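-- pv_equiv track=rewrite | github.com/ZosiaZamoyska/algorithms | solutions/advanced/Binary Tree/common_2BSTs.py | count_common_nodes
-- ===== SOURCE A (Python) =====
-- def inorder_traversal(tree):
--     n = len(tree)
--     result = []
--     def dfs(i):
--         if i >= n or tree[i] is None:
--             return
--         dfs(2 * i)
--         result.append(tree[i])
--         dfs(2 * i + 1)
--     dfs(1)
--     return result
--
-- def count_common_nodes(tree1, tree2):
--     arr1 = inorder_traversal(tree1)  # sorted
--     arr2 = inorder_traversal(tree2)  # sorted
--
--     # merge-like traversal to count intersection
--     i = j = count = 0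
--     while i < len(arr1) and j < len(arr2):
--         if arr1[i] == arr2[j]:
--             count += 1
--             i += 1
--             j += 1
--         elif arr1[i] < arr2[j]:
--             i += 1
--         else:
--             j += 1
--     return count
-- ===== SOURCE B (Python) =====
-- def count_common_nodes(tree1, tree2):
--     def inorder(tree, i):
--         if i >= len(tree) or tree[i] is None:
--             return []
--         return inorder(tree, 2 * i) + [tree[i]] + inorder(tree, 2 * i + 1)
--
--     ra = inorder(tree1, 1)[::-1]
--     rb = inorder(tree2, 1)[::-1]
--     count = 0
--     while ra and rb:
--         x, y = ra[-1], rb[-1]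
--         if x == y:
--             count += 1
--             ra.pop()
--             rb.pop()
--         elif x < y:
--             ra.pop()
--         else:
--             rb.pop()
--     return count
-- ===== Notes on version B (the rewrite author's own statement) =====
-- stated objective: alternative
-- what changed: The inorder traversal is rebuilt as a pure recursion returning concatenated sublists instead of a closure appending to a shared mutable list, and the common-count loop consumes reversed copies of the traversals as stacks (peek last / pop) instead of advancing two integer indices.
import Mathlib
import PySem

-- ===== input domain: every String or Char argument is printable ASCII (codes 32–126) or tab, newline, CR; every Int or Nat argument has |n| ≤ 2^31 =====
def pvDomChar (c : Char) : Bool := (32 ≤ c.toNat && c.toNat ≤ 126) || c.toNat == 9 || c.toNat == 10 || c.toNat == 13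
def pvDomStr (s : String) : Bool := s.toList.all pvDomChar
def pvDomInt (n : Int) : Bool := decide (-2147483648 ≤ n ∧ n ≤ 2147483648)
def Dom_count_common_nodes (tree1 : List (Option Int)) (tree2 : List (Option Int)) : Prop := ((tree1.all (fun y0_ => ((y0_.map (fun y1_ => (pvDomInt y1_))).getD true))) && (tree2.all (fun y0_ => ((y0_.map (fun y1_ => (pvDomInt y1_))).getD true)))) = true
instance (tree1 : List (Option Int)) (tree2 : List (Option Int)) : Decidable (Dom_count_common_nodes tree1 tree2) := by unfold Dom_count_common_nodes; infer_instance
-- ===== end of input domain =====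

-- B rebuilds the inorder traversal as a pure recursion returning concatenated lists (instead of a
-- closure appending to a shared mutable list) and counts common values by consuming reversed copies
-- of the traversals as stacks (peek last / pop) instead of advancing two integer indices; same cost,
-- alternative structure. Return-value equivalence only (neither program mutates its arguments).

-- ===== PORT A =====
-- A's nested `def dfs(i)` appending to the shared `result`; the accumulator `acc` IS `result`.
-- The extra argument `hi : 1 ≤ i` only justifies termination (dfs is invoked at 1 and doubles i).
def pvA_dfs (tree : List (Option Int)) (i : Nat) (hi : 1 ≤ i) (acc : List Int) : List Int :=
  if h : i < tree.length then
    match tree[i] with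
    | none => acc                      -- `tree[i] is None: return`
    | some v =>
        pvA_dfs tree (2 * i + 1) (by omega) (pvA_dfs tree (2 * i) (by omega) acc ++ [v])
  else acc                             -- `i >= n: return`
termination_by tree.length - i
decreasing_by all_goals omega

-- A's `while i < len(arr1) and j < len(arr2)` merge loop, indices i, j and running count.
def pvA_merge (a : List Int) (b : List Int) (i : Nat) (j : Nat) (count : Int) : Int :=
  if h : i < a.length ∧ j < b.length then
    if a[i]'h.1 = b[j]'h.2 then pvA_merge a b (i + 1) (j + 1) (count + 1)
    else if a[i]'h.1 < b[j]'h.2 then pvA_merge a b (i + 1) j count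
    else pvA_merge a b i (j + 1) count
  else count
termination_by (a.length - i) + (b.length - j)
decreasing_by all_goals omega

def count_common_nodes (tree1 : List (Option Int)) (tree2 : List (Option Int)) : Int :=
  pvA_merge (pvA_dfs tree1 1 (by omega) []) (pvA_dfs tree2 1 (by omega) []) 0 0 0

-- ===== PORT B =====
-- Source B's `inorder(tree, i)`: pure recursion returning left ++ [v] ++ right.
def pvB_ino (tree : List (Option Int)) (i : Nat) (hi : 1 ≤ i) : List Int :=
  if h : i < tree.length then
    match tree[i] with
    | none => []
    | some v => pvB_ino tree (2 * i) (by omega) ++ [v] ++ pvB_ino tree (2 * i + 1) (by omega)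
  else []
termination_by tree.length - i
decreasing_by all_goals omega

-- Source B's `while ra and rb` stack loop: peek ra[-1]/rb[-1], pop() = dropLast.
def pvB_loop (ra : List Int) (rb : List Int) (count : Int) : Int :=
  if h : ra ≠ [] ∧ rb ≠ [] then
    let x := ra.getLast h.1
    let y := rb.getLast h.2
    if x = y then pvB_loop ra.dropLast rb.dropLast (count + 1)
    else if x < y then pvB_loop ra.dropLast rb count
    else pvB_loop ra rb.dropLast count
  else count
termination_by ra.length + rb.length
decreasing_by
  all_goals
    simp only [List.length_dropLast]
    have h1 := List.length_pos_of_ne_nil h.1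
    have h2 := List.length_pos_of_ne_nil h.2
    omega

def count_common_nodes_alt (tree1 : List (Option Int)) (tree2 : List (Option Int)) : Int :=
  pvB_loop (pvB_ino tree1 1 (by omega)).reverse (pvB_ino tree2 1 (by omega)).reverse 0

-- ===== PRECONDITION & SPEC =====
def Spec_count_common_nodes (tree1 : List (Option Int)) (tree2 : List (Option Int)) (out : Int) : Prop := out = count_common_nodes_alt tree1 tree2
instance (tree1 : List (Option Int)) (tree2 : List (Option Int)) (out : Int) : Decidable (Spec_count_common_nodes tree1 tree2 out) := by unfold Spec_count_common_nodes; infer_instance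

-- ===== CLAIM (what is proved, stated in full; the proofs are below) =====
def Claim_equal_count_common_nodes : Prop := ∀ (tree1 : List (Option Int)) (tree2 : List (Option Int)), Dom_count_common_nodes tree1 tree2 → Spec_count_common_nodes tree1 tree2 (count_common_nodes tree1 tree2)

-- ===== LEMMAS AND PROOFS =====

-- A's accumulator-passing dfs is B's concatenation inorder appended to the accumulator.
theorem pv_dfs_eq (tree : List (Option Int)) (i : Nat) (hi : 1 ≤ i) (acc : List Int) :
    pvA_dfs tree i hi acc = acc ++ pvB_ino tree i hi := by
  rw [pvA_dfs, pvB_ino]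
  split
  · next h =>
    cases htv : tree[i] with
    | none => simp
    | some v =>
      dsimp only
      rw [pv_dfs_eq tree (2 * i + 1) (by omega), pv_dfs_eq tree (2 * i) (by omega)]
      simp
  · simp
termination_by tree.length - i
decreasing_by all_goals omega

-- Abstract head-structural form of the merge count, the bridge between the two loops.
def pvCC : List Int → List Int → Int → Int
  | x :: xs, y :: ys, c =>
    if x = y then pvCC xs ys (c + 1)
    else if x < y then pvCC xs (y :: ys) c
    else pvCC (x :: xs) ys c
  | _, _, c => c
termination_by a b _ => a.length + b.length

theorem pvCC_nil_left (b : List Int) (c : Int) : pvCC [] b c = c := by cases b <;> simp [pvCC]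

theorem pvCC_nil_right (a : List Int) (c : Int) : pvCC a [] c = c := by cases a <;> simp [pvCC]

-- B's reversed-stack loop computes the head-structural count of the original lists.
theorem pv_loop_eq (a b : List Int) (c : Int) : pvB_loop a.reverse b.reverse c = pvCC a b c := by
  match a, b with
  | [], b =>
    rw [pvB_loop, pvCC_nil_left]
    simp
  | x :: xs, [] =>
    rw [pvB_loop, pvCC_nil_right]
    simp
  | x :: xs, y :: ys =>
    rw [pvB_loop]
    simp only [List.reverse_cons]
    rw [dif_pos ⟨by simp, by simp⟩]
    simp only [List.getLast_concat, List.dropLast_concat]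
    rw [pvCC]
    split_ifs with h1 h2
    · rw [← pv_loop_eq xs ys]
    · rw [← List.reverse_cons, ← pv_loop_eq xs (y :: ys), List.reverse_cons]
    · rw [← List.reverse_cons, ← pv_loop_eq (x :: xs) ys, List.reverse_cons]
termination_by a.length + b.length
decreasing_by all_goals simp <;> omega

-- A's index-pointer merge computes the head-structural count of the suffixes.
theorem pv_merge_eq (a b : List Int) (i j : Nat) (c : Int) :
    pvA_merge a b i j c = pvCC (a.drop i) (b.drop j) c := by
  rw [pvA_merge]
  split
  · next h =>
    rw [List.drop_eq_getElem_cons h.1, List.drop_eq_getElem_cons h.2, pvCC]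
    split_ifs with h1 h2
    · rw [pv_merge_eq a b (i + 1) (j + 1)]
    · rw [pv_merge_eq a b (i + 1) j, List.drop_eq_getElem_cons h.2]
    · rw [pv_merge_eq a b i (j + 1), List.drop_eq_getElem_cons h.1]
  · next h =>
    rcases Nat.lt_or_ge i a.length with hi | hi
    · have hj : b.length ≤ j := by omega
      rw [List.drop_eq_nil_of_le hj, pvCC_nil_right]
    · rw [List.drop_eq_nil_of_le hi, pvCC_nil_left]
termination_by (a.length - i) + (b.length - j)
decreasing_by all_goals omega

-- ===== VERDICT (by name: the statement is the Claim_ definition above) =====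
theorem count_common_nodes_spec : Claim_equal_count_common_nodes := by
  intro tree1 tree2 _
  unfold Spec_count_common_nodes count_common_nodes count_common_nodes_alt
  rw [pv_dfs_eq, pv_dfs_eq, pv_merge_eq, pv_loop_eq]
  simp
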